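-- pv_equiv track=rewrite | github.com/zcorn2017/BioLLMComposition | preprocessing_dnaprodb2.py | find_empty_struct_paths
-- ===== SOURCE A (Python) =====
-- TYPE_DICT = "dict"
--
-- def find_empty_struct_paths(canonical_types):
--     """
--     Find dict-typed paths that have no child paths.
--     These would be empty structs that Parquet cannot write.
--     """
--     dict_paths = [p for p, t in canonical_types.items() if t == TYPE_DICT]
--     has_child = {p: False for p in dict_paths}
--
--     for p in dict_paths:
--         for q in canonical_types.keys():
--             if len(q) > len(p) and q[: len(p)] == p:
--                 has_child[p] = True
--                 break
--
--     empty_struct_paths = {p for p, child in has_child.items() if not child}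
--     return empty_struct_paths
-- ===== SOURCE B (Python) =====
-- TYPE_DICT = "dict"
--
-- def find_empty_struct_paths(canonical_types):
--     """
--     Find dict-typed paths that have no child paths.
--     These would be empty structs that Parquet cannot write.
--     """
--     dict_paths = {p for p, t in canonical_types.items() if t == TYPE_DICT}
--     marked = set()
--     for q in canonical_types:
--         for i in range(len(q)):
--             prefix = q[:i]
--             if prefix in dict_paths:
--                 marked.add(prefix)
--     return dict_paths - marked
-- ===== Notes on version B (the rewrite author's own statement) =====
-- stated objective: alternative
-- what changed: Instead of scanning all keys once per dict path (A's nested loops with an inner break), B builds a set of dict-typed paths once and makes a single pass over the keys, marking every proper prefix of a key that is a dict path, then returns the unmarked dict paths by set difference.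
import Mathlib
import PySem

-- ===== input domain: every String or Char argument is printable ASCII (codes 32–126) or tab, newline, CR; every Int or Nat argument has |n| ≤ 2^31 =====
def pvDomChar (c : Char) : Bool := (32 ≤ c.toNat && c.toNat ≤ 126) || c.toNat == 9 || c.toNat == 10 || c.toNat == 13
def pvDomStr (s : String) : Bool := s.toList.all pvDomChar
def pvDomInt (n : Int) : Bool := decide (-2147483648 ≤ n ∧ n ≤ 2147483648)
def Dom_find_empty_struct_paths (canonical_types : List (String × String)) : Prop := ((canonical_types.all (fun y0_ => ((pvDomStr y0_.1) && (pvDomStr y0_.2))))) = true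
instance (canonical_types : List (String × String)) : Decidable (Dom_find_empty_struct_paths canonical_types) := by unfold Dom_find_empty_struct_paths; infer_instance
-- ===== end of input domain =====

-- B replaces A's per-dict-path scan over all keys by one pass over the keys that marks
-- each proper prefix of a key that is a dict path (objective: alternative).

-- ===== PORT A =====
-- literal port of A: dict_paths list, has_child dict initialised to False,
-- inner scan over all keys with break (= List.any), then the set comprehension
def find_empty_struct_paths (canonical_types : List (String × String)) : List String :=
  let dict_paths := (canonical_types.filter (fun pt => pt.2 == "dict")).map Prod.fst
  let has_child : PySem.Dict String Bool :=
    dict_paths.foldl (fun d p => d.insert p false) PySem.Dict.empty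
  let has_child := dict_paths.foldl (fun d p =>
      if (canonical_types.map Prod.fst).any (fun q =>
            decide (PySem.Str.len p < PySem.Str.len q) &&
            (PySem.Str.slice q none (some (PySem.Str.len p)) == p))
      then d.insert p true else d) has_child
  PySem.Set.ofList ((has_child.items.filter (fun pc => !pc.2)).map Prod.fst)

-- ===== PORT B =====
-- literal port of B: set of dict paths, one pass marking every proper prefix of a
-- key that is a dict path, then set difference
def find_empty_struct_paths_alt (canonical_types : List (String × String)) : List String :=
  let dict_paths : PySem.Set String :=
    PySem.Set.ofList ((canonical_types.filter (fun pt => pt.2 == "dict")).map Prod.fst)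
  let marked : PySem.Set String :=
    canonical_types.foldl (fun m qt =>
      (PySem.List.pyRange 0 (PySem.Str.len qt.1) 1).foldl (fun m i =>
        if dict_paths.contains (PySem.Str.slice qt.1 none (some i)) then
          m.add (PySem.Str.slice qt.1 none (some i))
        else m) m) PySem.Set.empty
  PySem.Set.diff dict_paths marked

-- ===== PRECONDITION & SPEC =====
def Spec_find_empty_struct_paths (canonical_types : List (String × String)) (out : List String) : Prop := out = find_empty_struct_paths_alt canonical_types
instance (canonical_types : List (String × String)) (out : List String) : Decidable (Spec_find_empty_struct_paths canonical_types out) := by unfold Spec_find_empty_struct_paths; infer_instance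

-- ===== CLAIM (what is proved, stated in full; the proofs are below) =====
def Claim_equal_find_empty_struct_paths : Prop := ∀ (canonical_types : List (String × String)), Dom_find_empty_struct_paths canonical_types → Spec_find_empty_struct_paths canonical_types (find_empty_struct_paths canonical_types)

-- ===== LEMMAS AND PROOFS =====

-- A's child test for a path p (the body of A's inner loop), as a predicate
def pvChild (ct : List (String × String)) (p : String) : Bool :=
  (ct.map Prod.fst).any (fun q =>
    decide (PySem.Str.len p < PySem.Str.len q) &&
    (PySem.Str.slice q none (some (PySem.Str.len p)) == p))

-- generic: membership in a conditional add-fold over a list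
theorem pv_mem_foldl_add {α β : Type} [BEq β] [LawfulBEq β] (l : List α)
    (m0 : PySem.Set β) (cnd : α → Bool) (f : α → β) (x : β) :
    x ∈ l.foldl (fun m a => if cnd a then m.add (f a) else m) m0 ↔
      x ∈ m0 ∨ ∃ a ∈ l, cnd a = true ∧ f a = x := by
  induction l generalizing m0 with
  | nil => simp
  | cons a l ih =>
    simp only [List.foldl_cons]
    rw [ih]
    by_cases h : cnd a = true
    · simp only [h, if_pos, PySem.Set.mem_add, List.mem_cons]
      constructor
      · rintro ((hx | rfl) | ⟨b, hb, hc, rfl⟩)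
        · exact Or.inl hx
        · exact Or.inr ⟨a, Or.inl rfl, h, rfl⟩
        · exact Or.inr ⟨b, Or.inr hb, hc, rfl⟩
      · rintro (hx | ⟨b, (rfl | hb), hc, rfl⟩)
        · exact Or.inl (Or.inl hx)
        · exact Or.inl (Or.inr rfl)
        · exact Or.inr ⟨b, hb, hc, rfl⟩
    · simp only [h, List.mem_cons]
      constructor
      · rintro (hx | ⟨b, hb, hc, rfl⟩)
        · exact Or.inl hx
        · exact Or.inr ⟨b, Or.inr hb, hc, rfl⟩
      · rintro (hx | ⟨b, (rfl | hb), hc, rfl⟩)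
        · exact Or.inl hx
        · exact absurd hc h
        · exact Or.inr ⟨b, hb, hc, rfl⟩


-- membership in B's marked set
theorem pv_mem_marked (ct : List (String × String)) (D : PySem.Set String)
    (m0 : PySem.Set String) (x : String) :
    x ∈ ct.foldl (fun m qt =>
        (PySem.List.pyRange 0 (PySem.Str.len qt.1) 1).foldl (fun m i =>
          if D.contains (PySem.Str.slice qt.1 none (some i)) then
            m.add (PySem.Str.slice qt.1 none (some i))
          else m) m) m0 ↔
      x ∈ m0 ∨ ∃ qt ∈ ct, ∃ i ∈ PySem.List.pyRange 0 (PySem.Str.len qt.1) 1,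
        D.contains (PySem.Str.slice qt.1 none (some i)) = true ∧
        PySem.Str.slice qt.1 none (some i) = x := by
  induction ct generalizing m0 with
  | nil => simp
  | cons qt ct ih =>
    simp only [List.foldl_cons]
    rw [ih, pv_mem_foldl_add]
    simp only [List.mem_cons]
    constructor
    · rintro ((hx | ⟨i, hi, hc, hfx⟩) | ⟨qt', hqt', hhit⟩)
      · exact Or.inl hx
      · exact Or.inr ⟨qt, Or.inl rfl, i, hi, hc, hfx⟩
      · exact Or.inr ⟨qt', Or.inr hqt', hhit⟩
    · rintro (hx | ⟨qt', (rfl | hqt'), hhit⟩)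
      · exact Or.inl (Or.inl hx)
      · obtain ⟨i, hi, hc, hfx⟩ := hhit
        exact Or.inl (Or.inr ⟨i, hi, hc, hfx⟩)
      · exact Or.inr ⟨qt', hqt', hhit⟩

-- get? after A's first fold
theorem pv_fold1_get? (l : List String) (d : PySem.Dict String Bool) (p : String) :
    (l.foldl (fun d p => d.insert p false) d).get? p =
      if p ∈ l then some false else d.get? p := by
  induction l generalizing d with
  | nil => simp
  | cons q l ih =>
    simp only [List.foldl_cons]
    rw [ih]
    rw [PySem.Dict.get?_insert]
    by_cases hm : p ∈ l
    · simp [hm]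
    · by_cases hpq : p = q <;> simp [hm, hpq]

-- keys after A's first fold: Set.ofList order
theorem pv_fold1_keys (l : List String) (d : PySem.Dict String Bool) :
    (l.foldl (fun d p => d.insert p false) d).keys = l.foldl PySem.Set.add d.keys := by
  induction l generalizing d with
  | nil => simp
  | cons q l ih =>
    simp only [List.foldl_cons]
    rw [ih]
    congr 1
    by_cases h : d.contains q = true
    · rw [PySem.Dict.keys_insert_of_contains d false h]
      rw [PySem.Dict.contains_eq_decide_mem_keys] at h
      simp only [PySem.Set.add]
      rw [if_pos]
      simpa using of_decide_eq_true h
    · rw [PySem.Dict.keys_insert_of_not_contains d false (by simpa using h)]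
      rw [PySem.Dict.contains_eq_decide_mem_keys] at h
      simp only [PySem.Set.add]
      rw [if_neg]
      simpa using h

-- get? after A's second fold
theorem pv_fold2_get? (c : String → Bool) (l : List String) (d : PySem.Dict String Bool)
    (p : String) :
    (l.foldl (fun d p => if c p then d.insert p true else d) d).get? p =
      if p ∈ l ∧ c p = true then some true else d.get? p := by
  induction l generalizing d with
  | nil =>
    rw [List.foldl_nil, if_neg]
    rintro ⟨h1, _⟩
    exact List.not_mem_nil h1
  | cons q l ih =>
    simp only [List.foldl_cons]
    rw [ih]
    by_cases hm : p ∈ l ∧ c p = true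
    · simp [hm]
    · rw [if_neg hm]
      by_cases hq : c q = true
      · rw [if_pos hq, PySem.Dict.get?_insert]
        by_cases hpq : p = q
        · subst hpq
          simp [hq]
        · rw [if_neg hpq, if_neg]
          rintro ⟨h1, h2⟩
          rcases List.mem_cons.mp h1 with rfl | h1
          · exact hpq rfl
          · exact hm ⟨h1, h2⟩
      · rw [if_neg hq, if_neg]
        rintro ⟨h1, h2⟩
        rcases List.mem_cons.mp h1 with rfl | h1
        · exact hq h2
        · exact hm ⟨h1, h2⟩

-- keys after A's second fold (all inserted keys already present)
theorem pv_fold2_keys (c : String → Bool) (l : List String) (d : PySem.Dict String Bool)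
    (h : ∀ p ∈ l, p ∈ d.keys) :
    (l.foldl (fun d p => if c p then d.insert p true else d) d).keys = d.keys := by
  induction l generalizing d with
  | nil => simp
  | cons q l ih =>
    simp only [List.foldl_cons]
    have hq : d.contains q = true := by
      rw [PySem.Dict.contains_eq_decide_mem_keys]
      exact decide_eq_true (h q List.mem_cons_self)
    have hkeys : (if c q then d.insert q true else d).keys = d.keys := by
      by_cases hc : c q = true
      · rw [if_pos hc, PySem.Dict.keys_insert_of_contains d true hq]
      · rw [if_neg hc]
    rw [ih, hkeys]
    intro p hp
    rw [hkeys]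
    exact h p (List.mem_cons_of_mem q hp)

-- the two dict folds of A produce exactly the deduped paths with their child bit
theorem pv_dict_char (l : List String) (c : String → Bool) :
    ((l.foldl (fun d p => if c p then d.insert p true else d)
        (l.foldl (fun d p => d.insert p false) PySem.Dict.empty)).items.filter
        (fun pc => !pc.2)).map Prod.fst
      = (PySem.Set.ofList l).filter (fun p => !c p) := by
  set d1 := l.foldl (fun d p => d.insert p false) PySem.Dict.empty with hd1
  set d2 := l.foldl (fun d p => if c p then d.insert p true else d) d1 with hd2
  have hk1 : d1.keys = PySem.Set.ofList l := by
    rw [hd1, pv_fold1_keys, PySem.Dict.keys_empty]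
    rfl
  have hmem1 : ∀ p ∈ l, p ∈ d1.keys := by
    intro p hp
    rw [hk1]
    exact (PySem.Set.mem_ofList l p).mpr hp
  have hk2 : d2.keys = PySem.Set.ofList l := by
    rw [hd2, pv_fold2_keys c l d1 hmem1, hk1]
  have hnd : d2.keys.Nodup := by
    rw [hk2]
    exact PySem.Set.nodup_ofList l
  have hgetD : ∀ p ∈ PySem.Set.ofList l, d2.getD p false = c p := by
    intro p hp
    have hpl : p ∈ l := (PySem.Set.mem_ofList l p).mp hp
    rw [PySem.Dict.getD_eq_get?_getD, hd2, pv_fold2_get?]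
    by_cases hc : c p = true
    · rw [if_pos ⟨hpl, hc⟩, hc]
      rfl
    · rw [if_neg (fun h => hc h.2), pv_fold1_get?, if_pos hpl]
      simp [Bool.not_eq_true] at hc
      rw [hc]
      rfl
  have main : ∀ ks : List String, (∀ p ∈ ks, d2.getD p false = c p) →
      ((ks.map (fun k => (k, d2.getD k false))).filter (fun pc => !pc.2)).map Prod.fst
        = ks.filter (fun p => !c p) := by
    intro ks hks
    induction ks with
    | nil => rfl
    | cons k ks ih =>
      have hk := hks k List.mem_cons_self
      have ih' := ih (fun p hp => hks p (List.mem_cons_of_mem _ hp))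
      simp only [List.map_cons, List.filter_cons, hk]
      by_cases hc : c k = true
      · simp [hc, ih']
      · simp only [Bool.not_eq_true] at hc
        simp [hc, ih']
  rw [PySem.Dict.items_eq_map_keys d2 hnd false, hk2]
  exact main _ hgetD

-- A computes: dict paths (deduped, first-insertion order) without a child, in order
theorem pv_A_char (ct : List (String × String)) :
    find_empty_struct_paths ct =
      (PySem.Set.ofList ((ct.filter (fun pt => pt.2 == "dict")).map Prod.fst)).filter
        (fun p => !pvChild ct p) := by
  have h2 : find_empty_struct_paths ct = PySem.Set.ofList
      (((((ct.filter (fun pt => pt.2 == "dict")).map Prod.fst).foldl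
          (fun d p => if pvChild ct p then d.insert p true else d)
          ((((ct.filter (fun pt => pt.2 == "dict")).map Prod.fst).foldl
            (fun d p => d.insert p false) PySem.Dict.empty))).items.filter
          (fun pc => !pc.2)).map Prod.fst) := rfl
  rw [h2, pv_dict_char _ (pvChild ct)]
  exact PySem.Set.ofList_eq_self_of_nodup _ ((PySem.Set.nodup_ofList _).filter _)

-- a proper prefix q[:i] (0 ≤ i < len q) equals p iff i = len p and A's test fires
theorem pv_prefix_iff (q p : String) (i : Int)
    (hi : i ∈ PySem.List.pyRange 0 (PySem.Str.len q) 1) :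
    PySem.Str.slice q none (some i) = p ↔
      (i = PySem.Str.len p ∧ PySem.Str.len p < PySem.Str.len q ∧
       PySem.Str.slice q none (some (PySem.Str.len p)) = p) := by
  rw [PySem.List.mem_pyRange_one] at hi
  obtain ⟨h0, hlt⟩ := hi
  rw [PySem.Str.len_eq q] at hlt
  constructor
  · intro h
    have hl : (PySem.Str.slice q none (some i)).toList = p.toList := by rw [h]
    rw [PySem.Str.toList_slice, PySem.Chars.slice_eq_listSlice,
        PySem.List.slice_to q.toList h0] at hl
    have hlen : p.toList.length = i.toNat := by
      rw [← hl, List.length_take]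
      omega
    have hip : i = PySem.Str.len p := by
      rw [PySem.Str.len_eq]
      omega
    refine ⟨hip, ?_, by rw [← hip]; exact h⟩
    rw [PySem.Str.len_eq q, PySem.Str.len_eq p]
    omega
  · rintro ⟨rfl, _, hsl⟩
    exact hsl

-- A's child test holds for a dict path p iff some key has p as a proper prefix
theorem pv_child_iff_hit (ct : List (String × String)) (D : PySem.Set String)
    (hD : D = PySem.Set.ofList ((ct.filter (fun pt => pt.2 == "dict")).map Prod.fst))
    (p : String) (hp : p ∈ D) :
    pvChild ct p = true ↔
      ∃ qt ∈ ct, ∃ i ∈ PySem.List.pyRange 0 (PySem.Str.len qt.1) 1,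
        D.contains (PySem.Str.slice qt.1 none (some i)) = true ∧
        PySem.Str.slice qt.1 none (some i) = p := by
  unfold pvChild
  rw [List.any_eq_true]
  constructor
  · rintro ⟨q, hq, hb⟩
    rw [Bool.and_eq_true, decide_eq_true_iff, beq_iff_eq] at hb
    obtain ⟨hlt, hsl⟩ := hb
    obtain ⟨qt, hqt, rfl⟩ := List.mem_map.mp hq
    refine ⟨qt, hqt, PySem.Str.len p, ?_, ?_, hsl⟩
    · rw [PySem.List.mem_pyRange_one]
      constructor
      · rw [PySem.Str.len_eq]; positivity
      · exact hlt
    · rw [hsl]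
      exact (PySem.Set.contains_iff D p).mpr hp
  · rintro ⟨qt, hqt, i, hi, _, hsl⟩
    refine ⟨qt.1, List.mem_map.mpr ⟨qt, hqt, rfl⟩, ?_⟩
    rw [Bool.and_eq_true, decide_eq_true_iff, beq_iff_eq]
    obtain ⟨rfl, hlt, hsl'⟩ := (pv_prefix_iff qt.1 p i hi).mp hsl
    exact ⟨hlt, hsl'⟩

-- ===== VERDICT (by name: the statement is the Claim_ definition above) =====
theorem find_empty_struct_paths_spec : Claim_equal_find_empty_struct_paths := by
  intro ct _
  unfold Spec_find_empty_struct_paths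
  rw [pv_A_char]
  show _ = find_empty_struct_paths_alt ct
  unfold find_empty_struct_paths_alt
  simp only [PySem.Set.diff]
  apply List.filter_congr
  intro p hp
  congr 1
  rw [Bool.eq_iff_iff, PySem.Set.contains_iff]
  refine Iff.trans (pv_child_iff_hit ct _ rfl p hp) ?_
  refine Iff.symm (Iff.trans (pv_mem_marked ct _ PySem.Set.empty p) ?_)
  constructor
  · rintro (hx | h)
    · exact absurd hx (List.not_mem_nil)
    · exact h
  · exact Or.inr
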